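-- pv_equiv track=rewrite | github.com/dgsim126/Algo_Study_2 | Programmers/심동근/250426/글자수.py | solution
-- ===== SOURCE A (Python) =====
-- def solution(str1, str2):
--     dic= {}
--
--     for val in str1:
--         dic[val]= 0
--
--     for val in str2:
--         if(val in dic.keys()):
--             dic[val]+=1
--
--     result= 0
--     for key, value in dic.items():
--         if(value>result):
--             result= value
--
--     return result
-- ===== SOURCE B (Python) =====
-- def solution(str1, str2):
--     best = 0
--     for ch in str1:
--         n = 0
--         for c in str2:
--             if c == ch:
--                 n += 1
--         if n > best:
--             best = n
--     return best
-- ===== Notes on version B (the rewrite author's own statement) =====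
-- stated objective: simpler
-- what changed: A builds a hash table (seed str1's keys, count str2's matching chars into it, scan the table for the max); B uses no dictionary at all: a plain brute-force nested scan that counts each str1 character in str2 directly and keeps a running maximum, trading linear time for quadratic.
import Mathlib
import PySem

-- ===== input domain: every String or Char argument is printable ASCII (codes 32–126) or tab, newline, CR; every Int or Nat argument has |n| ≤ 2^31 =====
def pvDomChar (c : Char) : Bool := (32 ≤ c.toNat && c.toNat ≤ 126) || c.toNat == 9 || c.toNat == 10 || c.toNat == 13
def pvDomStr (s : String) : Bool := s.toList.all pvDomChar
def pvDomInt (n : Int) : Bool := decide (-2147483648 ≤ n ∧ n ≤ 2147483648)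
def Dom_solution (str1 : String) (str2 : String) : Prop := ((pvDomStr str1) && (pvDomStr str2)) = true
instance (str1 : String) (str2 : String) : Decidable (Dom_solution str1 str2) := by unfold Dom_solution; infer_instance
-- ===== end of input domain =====

-- B drops A's hash table entirely: a brute-force nested scan (count each str1 char in str2
-- directly, keep a running max) — an alternative decomposition, not faster.

-- ===== PORT A =====
def solution (str1 : String) (str2 : String) : Int :=
  let dic : PySem.Dict Char Int :=
    str1.toList.foldl (fun d v => d.insert v 0) PySem.Dict.empty
  let dic :=
    str2.toList.foldl
      (fun d v => if d.contains v then d.modify v 0 (· + 1) else d) dic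
  dic.items.foldl (fun result kv => if kv.2 > result then kv.2 else result) 0

-- ===== PORT B =====
def solution_alt (str1 : String) (str2 : String) : Int :=
  str1.toList.foldl
    (fun best ch =>
      let n := str2.toList.foldl (fun n c => if c == ch then n + 1 else n) (0 : Int)
      if n > best then n else best) 0

-- ===== PRECONDITION & SPEC =====
def Spec_solution (str1 : String) (str2 : String) (out : Int) : Prop := out = solution_alt str1 str2
instance (str1 : String) (str2 : String) (out : Int) : Decidable (Spec_solution str1 str2 out) := by unfold Spec_solution; infer_instance

-- ===== CLAIM (what is proved, stated in full; the proofs are below) =====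
def Claim_equal_solution : Prop := ∀ (str1 : String) (str2 : String), Dom_solution str1 str2 → Spec_solution str1 str2 (solution str1 str2)

-- ===== LEMMAS AND PROOFS =====

-- A's seeding loop: every stored value is 0.
lemma getD_seed_zero (l : List Char) (d : PySem.Dict Char Int)
    (h : ∀ c, d.getD c 0 = 0) (c : Char) :
    (l.foldl (fun d v => d.insert v 0) d).getD c 0 = 0 := by
  induction l generalizing d with
  | nil => exact h c
  | cons x t ih =>
      refine ih _ (fun c' => ?_)
      rw [PySem.Dict.getD_insert]
      split <;> simp [h]

-- A's counting loop: keys are unchanged, and each key's value grows by its count in l.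
lemma count_loop (l : List Char) (d : PySem.Dict Char Int) :
    (l.foldl (fun d v => if d.contains v then d.modify v 0 (· + 1) else d) d).keys = d.keys ∧
    ∀ c, (l.foldl (fun d v => if d.contains v then d.modify v 0 (· + 1) else d) d).getD c 0 =
      d.getD c 0 + (if c ∈ d.keys then (l.count c : Int) else 0) := by
  induction l generalizing d with
  | nil => simp
  | cons x t ih =>
      by_cases hx : d.contains x = true
      · have hkeys : (d.modify x 0 (· + 1)).keys = d.keys := by
          rw [PySem.Dict.keys_modify]
          exact PySem.Dict.keys_insert_of_contains d _ hx
        have hsel : (if d.contains x then d.modify x 0 (· + 1) else d) = d.modify x 0 (· + 1) := by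
          simp [hx]
        obtain ⟨ik, iv⟩ := ih (d.modify x 0 (· + 1))
        refine ⟨by rw [List.foldl_cons, hsel, ik, hkeys], fun c => ?_⟩
        rw [List.foldl_cons, hsel, iv c, hkeys, PySem.Dict.getD_modify]
        have hxmem : x ∈ d.keys := (PySem.Dict.contains_iff_mem_keys d x).mp hx
        by_cases hc : c = x
        · subst hc; simp [hxmem]; ring
        · simp [hc, Ne.symm hc]
      · have hstep : (if d.contains x then d.modify x 0 (· + 1) else d) = d := by
          simp [hx]
        obtain ⟨ik, iv⟩ := ih d
        refine ⟨by rw [List.foldl_cons, hstep]; exact ik, fun c => ?_⟩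
        rw [List.foldl_cons, hstep, iv c]
        by_cases hc : c = x
        · subst hc
          have : c ∉ d.keys := fun hm => hx ((PySem.Dict.contains_iff_mem_keys d c).mpr hm)
          simp [this]
        · simp [Ne.symm hc]

-- a running max over a projection depends only on which elements occur
lemma foldl_max_le (f : Char → Int) (l1 l2 : List Char)
    (h : ∀ c ∈ l1, c ∈ l2) :
    (l1.map f).foldl max 0 ≤ (l2.map f).foldl max 0 := by
  rcases PySem.List.foldl_max_mem (l1.map f) 0 with h0 | hm
  · rw [h0]; exact (PySem.List.le_foldl_max (l2.map f) 0).1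
  · obtain ⟨c, hc, hfc⟩ := List.mem_map.mp hm
    rw [← hfc]
    exact (PySem.List.le_foldl_max (l2.map f) 0).2 _ (List.mem_map.mpr ⟨c, h c hc, rfl⟩)

lemma foldl_max_set_eq (f : Char → Int) (l1 l2 : List Char)
    (h : ∀ c, c ∈ l1 ↔ c ∈ l2) :
    (l1.map f).foldl max 0 = (l2.map f).foldl max 0 :=
  le_antisymm (foldl_max_le f l1 l2 (fun c hc => (h c).mp hc))
    (foldl_max_le f l2 l1 (fun c hc => (h c).mpr hc))

-- B, unfolded: a running max of counts over str1's characters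
lemma solution_alt_eq (str1 str2 : String) :
    solution_alt str1 str2 =
      (str1.toList.map (fun c => (str2.toList.count c : Int))).foldl max 0 := by
  unfold solution_alt
  rw [List.foldl_map]
  refine PySem.List.foldl_congr_mem _ _ _ 0 (fun b ch _ => ?_)
  rw [PySem.List.foldl_beq_add_one]
  simp only [zero_add]
  omega

lemma solution_eq (str1 str2 : String) :
    solution str1 str2 =
      ((str2.toList.foldl
          (fun d v => if d.contains v then d.modify v 0 (· + 1) else d)
          (str1.toList.foldl (fun d v => d.insert v 0) PySem.Dict.empty)).items).foldl
        (fun result kv => if kv.2 > result then kv.2 else result) 0 := rfl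

theorem solution_spec : Claim_equal_solution := by
  intro str1 str2 _
  unfold Spec_solution
  rw [solution_eq]
  set f : Char → Int := fun c => (str2.toList.count c : Int) with hf
  -- A's seeded dict
  set d0 : PySem.Dict Char Int :=
    str1.toList.foldl (fun d v => d.insert v 0) PySem.Dict.empty with hd0
  have hkeys0 : d0.keys = PySem.Set.update [] str1.toList := by
    rw [hd0, PySem.Dict.keys_foldl_insert (f := fun _ _ => (0 : Int))]
    simp [PySem.Dict.keys_empty]
  have hmem0 : ∀ c, c ∈ d0.keys ↔ c ∈ str1.toList := by
    intro c
    rw [hkeys0]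
    exact PySem.Set.mem_ofList str1.toList c
  have hnd0 : d0.keys.Nodup := by
    rw [hd0]
    exact PySem.Dict.nodup_keys_foldl_insert _ _ _ (by simp [PySem.Dict.keys_empty])
  have hz0 : ∀ c, d0.getD c 0 = 0 :=
    getD_seed_zero str1.toList PySem.Dict.empty (by simp [PySem.Dict.getD_empty])
  -- A's counted dict
  set d1 : PySem.Dict Char Int :=
    str2.toList.foldl (fun d v => if d.contains v then d.modify v 0 (· + 1) else d) d0 with hd1
  obtain ⟨hk1, hv1⟩ := count_loop str2.toList d0
  rw [← hd1] at hk1 hv1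
  have hnd1 : d1.keys.Nodup := hk1 ▸ hnd0
  -- A's final scan = running max over d1's keys
  rw [PySem.Dict.items_eq_map_keys d1 hnd1 0]
  rw [List.foldl_map]
  have hstep : ∀ (r : Int), ∀ k ∈ d1.keys,
      (if (k, d1.getD k 0).2 > r then (k, d1.getD k 0).2 else r) = max r (f k) := by
    intro r k hk
    have hkmem : k ∈ d0.keys := hk1 ▸ hk
    have : d1.getD k 0 = f k := by rw [hv1 k, hz0 k]; simp [hkmem, hf]
    simp only [this, hf]; omega
  rw [PySem.List.foldl_congr_mem d1.keys _ (fun r k => max r (f k)) 0 hstep]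
  rw [← List.foldl_map]
  rw [solution_alt_eq, ← hf]
  exact foldl_max_set_eq f d1.keys str1.toList (fun c => hk1 ▸ hmem0 c)
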